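-- pv_equiv track=rewrite | github.com/jungle126/project | 2_scenario/python/print_Frac.py | nDp_to_filtered_nD
-- ===== SOURCE A (Python) =====
-- def nDp_to_filtered_nD(nDp,timeafter=96):
--     timeafter=96
--     nDp = list(map(list, zip(*nDp)))#do T process keep Dp-Bin as hang
--     list_nDp = []
--     for i in range(len(nDp)):
--         list_nDp.append(sum(nDp[i][timeafter:])) # do Sum(n(dp[time]))
--     BC_conc_SUM2 = sum(list_nDp) # do Sum n[dp]
--     return BC_conc_SUM2
-- ===== SOURCE B (Python) =====
-- def nDp_to_filtered_nD(nDp, timeafter=96):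
--     # Sum of all entries in rows from index 96 onward, each row truncated
--     # to the shortest row length (mirroring zip's truncation), no transpose.
--     if not nDp:
--         return 0
--     m = min(len(row) for row in nDp)
--     return sum(sum(row[:m]) for row in nDp[96:])
-- ===== Notes on version B (the rewrite author's own statement) =====
-- stated objective: simpler
-- what changed: B drops the transpose entirely: instead of materializing zip(*nDp) and summing columns' tails, it computes the minimum row length once and sums each original row (truncated to that minimum) from row index 96 onward.
import Mathlib
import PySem

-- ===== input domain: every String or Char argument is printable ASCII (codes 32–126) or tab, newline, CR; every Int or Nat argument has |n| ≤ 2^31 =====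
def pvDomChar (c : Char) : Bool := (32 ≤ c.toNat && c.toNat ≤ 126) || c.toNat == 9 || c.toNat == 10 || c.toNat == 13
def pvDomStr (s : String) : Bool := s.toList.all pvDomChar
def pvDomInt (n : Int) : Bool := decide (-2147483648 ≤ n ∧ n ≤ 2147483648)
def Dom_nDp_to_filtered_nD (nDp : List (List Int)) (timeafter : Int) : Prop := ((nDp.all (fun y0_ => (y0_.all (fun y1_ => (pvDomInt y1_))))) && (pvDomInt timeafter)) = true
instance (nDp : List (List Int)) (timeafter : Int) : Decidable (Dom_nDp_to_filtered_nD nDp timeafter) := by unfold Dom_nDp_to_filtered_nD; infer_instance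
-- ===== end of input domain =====

-- B removes the transpose: it sums each original row from index 96 onward, truncated to the
-- minimum row length (zip's truncation), instead of summing tails of reconstructed columns.
-- 'timeafter' is reassigned to 96 by A before use, so both ports ignore the parameter.

-- ===== PORT A =====
-- zip(*nDp) with list(map(list, ·)): emit the heads while every row is nonempty.
-- fuel = length of the first row (an upper bound on the number of emitted columns).
def pvZipAux : Nat → List (List Int) → List (List Int)
  | 0, _ => []
  | n + 1, ls =>
    if ls.any (fun r => r.isEmpty) then []
    else (ls.map (fun r => r.headD 0)) :: pvZipAux n (ls.map List.tail)

def pvZip (ls : List (List Int)) : List (List Int) :=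
  match ls with
  | [] => []
  | r :: rest => pvZipAux r.length (r :: rest)

def nDp_to_filtered_nD (nDp : List (List Int)) (timeafter : Int) : Int :=
  let _ := timeafter          -- timeafter = 96 (the parameter is overwritten)
  let t := pvZip nDp          -- nDp = list(map(list, zip(*nDp)))
  let list_nDp : List Int :=
    (PySem.List.pyRange 0 (t.length : Int) 1).foldl
      (fun acc i => acc ++ [(PySem.List.slice (PySem.List.pyGetD t i []) (some 96) none).sum]) []
  list_nDp.sum

-- ===== PORT B =====
def nDp_to_filtered_nD_alt (nDp : List (List Int)) (timeafter : Int) : Int :=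
  let _ := timeafter
  match nDp with
  | [] => 0
  | r :: rest =>
    -- m = min(len(row) for row in nDp)
    let m : Nat := (rest.map List.length).foldl min r.length
    -- sum(sum(row[:m]) for row in nDp[96:]); row[:m] with m ≥ 0 is List.take m (exact)
    ((PySem.List.slice (r :: rest) (some 96) none).map (fun row => (row.take m).sum)).sum

-- ===== PRECONDITION & SPEC =====
def Spec_nDp_to_filtered_nD (nDp : List (List Int)) (timeafter : Int) (out : Int) : Prop := out = nDp_to_filtered_nD_alt nDp timeafter
instance (nDp : List (List Int)) (timeafter : Int) (out : Int) : Decidable (Spec_nDp_to_filtered_nD nDp timeafter out) := by unfold Spec_nDp_to_filtered_nD; infer_instance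

-- ===== CLAIM (what is proved, stated in full; the proofs are below) =====
def Claim_equal_nDp_to_filtered_nD : Prop := ∀ (nDp : List (List Int)) (timeafter : Int), Dom_nDp_to_filtered_nD nDp timeafter → Spec_nDp_to_filtered_nD nDp timeafter (nDp_to_filtered_nD nDp timeafter)

-- ===== LEMMAS AND PROOFS =====

-- foldl min facts
theorem pv_foldl_min_le_init (l : List Nat) (a : Nat) : l.foldl min a ≤ a := by
  induction l generalizing a with
  | nil => simp
  | cons x xs ih => exact le_trans (ih (min a x)) (min_le_left a x)

theorem pv_foldl_min_le_mem (l : List Nat) (a x : Nat) (hx : x ∈ l) : l.foldl min a ≤ x := by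
  induction l generalizing a with
  | nil => cases hx
  | cons y ys ih =>
    rcases List.mem_cons.1 hx with h | h
    · subst h; exact le_trans (pv_foldl_min_le_init ys (min a x)) (min_le_right a x)
    · exact ih (min a y) h

theorem pv_foldl_min_mem (l : List Nat) (a : Nat) : l.foldl min a = a ∨ l.foldl min a ∈ l := by
  induction l generalizing a with
  | nil => left; rfl
  | cons y ys ih =>
    rcases ih (min a y) with h | h
    · rcases Nat.le_total a y with hay | hya
      · left; rw [List.foldl_cons, h]; exact min_eq_left hay
      · right; rw [List.foldl_cons, h, min_eq_right hya]; exact List.mem_cons_self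
    · right; exact List.mem_cons_of_mem y h

-- getD through tail
theorem pv_getD_tail (r : List Int) (i : Nat) : r.tail.getD i 0 = r.getD (i + 1) 0 := by
  cases r <;> simp

-- characterization of pvZipAux: it produces the k columns, k = exact minimum row length
theorem pvZipAux_eq (k : Nat) : ∀ (fuel : Nat) (ls : List (List Int)),
    (∀ r ∈ ls, k ≤ r.length) → (∃ r ∈ ls, r.length = k) → k ≤ fuel →
    pvZipAux fuel ls = (List.range k).map (fun i => ls.map (fun r => r.getD i 0)) := by
  induction k with
  | zero =>
    intro fuel ls _ hex _
    obtain ⟨r, hr, hlen⟩ := hex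
    have hany : ls.any (fun r => r.isEmpty) = true := by
      refine List.any_eq_true.2 ⟨r, hr, ?_⟩
      simp [List.length_eq_zero_iff.1 hlen]
    cases fuel with
    | zero => simp [pvZipAux]
    | succ n => simp [pvZipAux, hany]
  | succ k ih =>
    intro fuel ls hall hex hf
    cases fuel with
    | zero => omega
    | succ n =>
      have hany : ls.any (fun r => r.isEmpty) = false := by
        refine List.any_eq_false.2 (fun r hr => ?_)
        have := hall r hr
        simp [List.isEmpty_iff]
        intro h; subst h; simp at this
      have htails : pvZipAux n (ls.map List.tail)
          = (List.range k).map (fun i => (ls.map List.tail).map (fun r => r.getD i 0)) := by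
        apply ih
        · intro r hr
          obtain ⟨r', hr', rfl⟩ := List.mem_map.1 hr
          have := hall r' hr'
          simp [List.length_tail]; omega
        · obtain ⟨r, hr, hlen⟩ := hex
          exact ⟨r.tail, List.mem_map_of_mem hr, by simp [List.length_tail, hlen]⟩
        · omega
      rw [pvZipAux, if_neg (by simp [hany]), htails, List.range_succ_eq_map]
      simp only [List.map_cons, List.map_map]
      congr 1
      · refine List.map_congr_left (fun r _ => ?_)
        cases r <;> simp
      · refine List.map_congr_left (fun i _ => ?_)
        refine List.map_congr_left (fun r _ => ?_)
        exact pv_getD_tail r i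

-- sum of a take as an indexed sum
theorem pv_sum_take (r : List Int) (m : Nat) (hm : m ≤ r.length) :
    (r.take m).sum = ((List.range m).map (fun i => r.getD i 0)).sum := by
  induction r generalizing m with
  | nil =>
    have : m = 0 := Nat.le_zero.1 (by simpa using hm)
    subst this; simp
  | cons a l ih =>
    cases m with
    | zero => simp
    | succ k =>
      rw [List.range_succ_eq_map]
      simp only [List.take_succ_cons, List.sum_cons, List.map_cons, List.map_map]
      rw [ih k (by simpa using hm)]
      refine congrArg (_ + ·) (congrArg List.sum (List.map_congr_left (fun i _ => ?_)))
      simp [Function.comp]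

-- exchange of a double list sum
theorem pv_sum_swap {α β : Type} (L : List α) (M : List β) (f : α → β → Int) :
    (L.map (fun x => (M.map (f x)).sum)).sum = (M.map (fun y => (L.map (fun x => f x y)).sum)).sum := by
  induction L with
  | nil => simp
  | cons a l ih =>
    simp only [List.map_cons, List.sum_cons, ih]
    rw [← PySem.List.sum_map_add_int]

-- ===== VERDICT (by name: the statement is the Claim_ definition above) =====
theorem nDp_to_filtered_nD_spec : Claim_equal_nDp_to_filtered_nD := by
  intro nDp timeafter _
  unfold Spec_nDp_to_filtered_nD
  cases nDp with
  | nil => rfl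
  | cons r rest =>
    have hA : nDp_to_filtered_nD (r :: rest) timeafter
        = ((PySem.List.pyRange 0 (((pvZip (r :: rest)).length : Nat) : Int) 1).foldl
            (fun acc i => acc ++ [(PySem.List.slice (PySem.List.pyGetD (pvZip (r :: rest)) i []) (some 96) none).sum]) []).sum := rfl
    have hB : nDp_to_filtered_nD_alt (r :: rest) timeafter
        = ((PySem.List.slice (r :: rest) (some 96) none).map
            (fun row => (row.take ((rest.map List.length).foldl min r.length)).sum)).sum := rfl
    rw [hA, hB]
    set ls : List (List Int) := r :: rest with hls
    set m : Nat := (rest.map List.length).foldl min r.length with hm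
    have hmle : ∀ x ∈ ls, m ≤ x.length := by
      intro x hx
      rcases List.mem_cons.1 hx with h | h
      · subst h; exact pv_foldl_min_le_init _ _
      · exact pv_foldl_min_le_mem _ _ _ (List.mem_map_of_mem h)
    have hzip : pvZip ls = (List.range m).map (fun i => ls.map (fun x => x.getD i 0)) := by
      unfold pvZip
      apply pvZipAux_eq
      · exact hmle
      · rcases pv_foldl_min_mem (rest.map List.length) r.length with h | h
        · exact ⟨r, List.mem_cons_self, h.symm⟩
        · obtain ⟨x, hx, hlen⟩ := List.mem_map.1 h
          exact ⟨x, List.mem_cons_of_mem r hx, hlen⟩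
      · exact pv_foldl_min_le_init _ _
    rw [PySem.List.foldl_append_singleton_eq_map]
    rw [show (fun i => (PySem.List.slice (PySem.List.pyGetD (pvZip ls) i ([] : List Int)) (some 96) none).sum)
        = (fun col => (PySem.List.slice col (some (96 : Int)) none).sum)
            ∘ (fun i => PySem.List.pyGetD (pvZip ls) i ([] : List Int)) from rfl]
    rw [← List.map_map, PySem.List.map_pyGetD_pyRange_zero']
    rw [hzip, List.map_map]
    have hsl : ∀ {α : Type} (xs : List α), PySem.List.slice xs (some (96 : Int)) none = xs.drop 96 := by
      intro α xs
      rw [PySem.List.slice_from xs (show (0 : Int) ≤ 96 by norm_num)]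
      rfl
    simp only [hsl]
    calc ((List.range m).map fun i => ((ls.map fun x => x.getD i 0).drop 96).sum).sum
        = ((List.range m).map fun i => ((ls.drop 96).map (fun x => x.getD i 0)).sum).sum := by
          refine congrArg List.sum (List.map_congr_left (fun i _ => ?_))
          rw [← List.map_drop]
      _ = ((ls.drop 96).map (fun x => ((List.range m).map (fun i => x.getD i 0)).sum)).sum :=
          pv_sum_swap (List.range m) (ls.drop 96) (fun i x => x.getD i 0)
      _ = ((ls.drop 96).map (fun row => (row.take m).sum)).sum := by
          refine congrArg List.sum (List.map_congr_left (fun x hx => ?_))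
          exact (pv_sum_take x m (hmle x (List.mem_of_mem_drop hx))).symm
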